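-- pv_equiv track=rewrite | github.com/benbuzz790/bots | bots/tools/python_edit.py | _is_fstring_start
-- ===== SOURCE A (Python) =====
-- def _is_fstring_start(line, pos):
--     """Check if position starts an f-string (f", f', rf", etc.)"""
--     if pos >= len(line) or line[pos] not in ['"', "'"]:
--         return (False, False)
--     prefixes = {'f': (True, False), 'F': (True, False), 'rf': (True, True), 'Rf': (True, True), 'rF': (True, True), 'RF': (True, True), 'fr': (True, True), 'Fr': (True, True), 'fR': (True, True), 'FR': (True, True)}
--     for prefix, (is_f, is_raw) in prefixes.items():
--         prefix_start = pos - len(prefix)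
--         if prefix_start >= 0 and line[prefix_start:pos] == prefix and (prefix_start == 0 or not line[prefix_start - 1].isalnum()):
--             return (is_f, is_raw)
--     return (False, False)
-- ===== SOURCE B (Python) =====
-- def _is_fstring_start(line, pos):
--     """Check if position starts an f-string (f", f', rf", etc.)"""
--     if pos < 0 or pos >= len(line) or line[pos] not in ('"', "'"):
--         return (False, False)
--     start = pos
--     while start > 0 and line[start - 1].isalpha():
--         start -= 1
--     if start > 0 and line[start - 1].isalnum():
--         return (False, False)
--     prefix = line[start:pos].lower()
--     if prefix == 'f':
--         return (True, False)
--     if prefix in ('fr', 'rf'):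
--         return (True, True)
--     return (False, False)
-- ===== Notes on version B (the rewrite author's own statement) =====
-- stated objective: simpler
-- what changed: Instead of iterating a 10-entry table of prefix strings and slicing/comparing for each, B scans backward once over the alphabetic run before pos, checks the single boundary character with isalnum, and classifies the case-folded collected prefix ('f' / 'fr' / 'rf').
-- crash fix: When pos < -len(line) (and pos < len(line)), A raises IndexError via line[pos]; B returns (False, False). — e.g. on _is_fstring_start("", -1): A raises IndexError, B returns (false, false)
import Mathlib
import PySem

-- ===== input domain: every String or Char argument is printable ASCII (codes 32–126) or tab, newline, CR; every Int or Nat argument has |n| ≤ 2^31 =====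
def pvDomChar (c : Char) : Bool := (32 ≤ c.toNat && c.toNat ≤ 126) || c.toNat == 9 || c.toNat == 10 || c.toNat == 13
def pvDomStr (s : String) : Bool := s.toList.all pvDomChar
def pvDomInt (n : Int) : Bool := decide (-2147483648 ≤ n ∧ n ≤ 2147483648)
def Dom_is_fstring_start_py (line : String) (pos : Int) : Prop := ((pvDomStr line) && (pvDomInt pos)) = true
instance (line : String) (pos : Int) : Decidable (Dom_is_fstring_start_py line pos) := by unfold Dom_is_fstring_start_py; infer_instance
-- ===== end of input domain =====

-- B replaces A's 10-entry prefix table (one slice comparison per entry) by one backward scan over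
-- the alphabetic run before pos, one boundary check and a classification of the case-folded prefix (simpler).

-- ===== PORT A =====
-- the dict literal of A, as an association list in insertion order
def fstrPrefixes : List (List Char × (Bool × Bool)) :=
  [(['f'], (true, false)), (['F'], (true, false)),
   (['r', 'f'], (true, true)), (['R', 'f'], (true, true)), (['r', 'F'], (true, true)), (['R', 'F'], (true, true)),
   (['f', 'r'], (true, true)), (['F', 'r'], (true, true)), (['f', 'R'], (true, true)), (['F', 'R'], (true, true))]

-- A's 'for prefix, (is_f, is_raw) in prefixes.items(): …' with its early return
-- (prefix_start = pos - len(prefix) is inlined)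
def fstrPrefixLoop (cs : List Char) (pos : Int) : List (List Char × (Bool × Bool)) → Bool × Bool
  | [] => (false, false)
  | (pre, v) :: rest =>
    if pos - (pre.length : Int) ≥ 0 ∧
        PySem.List.slice cs (some (pos - (pre.length : Int))) (some pos) = pre ∧
        (pos - (pre.length : Int) = 0 ∨
          PySem.Chars.isalnum (PySem.List.pyGetD cs (pos - (pre.length : Int) - 1) ' ') = false) then v
    else fstrPrefixLoop cs pos rest

def is_fstring_start_py (line : String) (pos : Int) : Bool × Bool :=
  let cs := line.toList
  if pos ≥ (cs.length : Int) then (false, false)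
  else
    match PySem.List.pyGet? cs pos with
    | none => (false, false)  -- line[pos] raises IndexError here; excluded by Pre_
    | some c =>
      if ¬ (c = '"' ∨ c = '\'') then (false, false)
      else fstrPrefixLoop cs pos fstrPrefixes

-- ===== PORT B =====
-- B's 'while start > 0 and line[start-1].isalpha(): start -= 1'
def fstrScanStart (cs : List Char) : Nat → Nat
  | 0 => 0
  | s + 1 => if PySem.Chars.isalpha (cs.getD s ' ') = true then fstrScanStart cs s else s + 1

def is_fstring_start_py_alt (line : String) (pos : Int) : Bool × Bool :=
  let cs := line.toList
  if pos < 0 ∨ pos ≥ (cs.length : Int) then (false, false)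
  else
    let p := pos.toNat
    let c := cs.getD p ' '
    if ¬ (c = '"' ∨ c = '\'') then (false, false)
    else
      let start := fstrScanStart cs p
      if 0 < start ∧ PySem.Chars.isalnum (cs.getD (start - 1) ' ') = true then (false, false)
      else
        let pre := PySem.Chars.lower (PySem.List.slice cs (some (start : Int)) (some (p : Int)))
        if pre = ['f'] then (true, false)
        else if pre = ['f', 'r'] ∨ pre = ['r', 'f'] then (true, true)
        else (false, false)

-- ===== PRECONDITION & SPEC =====
-- Pre_ excludes exactly the inputs where A raises IndexError (pos < -len(line) with pos < len(line)).
def Pre_is_fstring_start_py (line : String) (pos : Int) : Prop :=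
  -(line.toList.length : Int) ≤ pos ∨ (line.toList.length : Int) ≤ pos
instance (line : String) (pos : Int) : Decidable (Pre_is_fstring_start_py line pos) := by
  unfold Pre_is_fstring_start_py; infer_instance

def pvWitness_is_fstring_start_py : String × Int := ("f\"", 1)

-- Where pos < -len(line) and pos < len(line), A raises IndexError at line[pos]; B returns (False, False).
def Raises_is_fstring_start_py (line : String) (pos : Int) : Prop :=
  pos < -(line.toList.length : Int) ∧ pos < (line.toList.length : Int)
instance (line : String) (pos : Int) : Decidable (Raises_is_fstring_start_py line pos) := by
  unfold Raises_is_fstring_start_py; infer_instance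
def pvRaiseWitness_is_fstring_start_py : String × Int := ("", -1)
def pvRaiseWitnessOut_is_fstring_start_py : Bool × Bool := (false, false)

def Spec_is_fstring_start_py (line : String) (pos : Int) (out : Bool × Bool) : Prop :=
  out = is_fstring_start_py_alt line pos
instance (line : String) (pos : Int) (out : Bool × Bool) : Decidable (Spec_is_fstring_start_py line pos out) := by
  unfold Spec_is_fstring_start_py; infer_instance

-- ===== CLAIM (what is proved, stated in full; the proofs are below) =====
def Claim_equal_is_fstring_start_py : Prop := ∀ (line : String) (pos : Int), Dom_is_fstring_start_py line pos → Pre_is_fstring_start_py line pos → Spec_is_fstring_start_py line pos (is_fstring_start_py line pos)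
def Claim_raises_is_fstring_start_py : Prop := (∀ (line : String) (pos : Int), Dom_is_fstring_start_py line pos → Raises_is_fstring_start_py line pos → ¬ Pre_is_fstring_start_py line pos) ∧ (Dom_is_fstring_start_py (pvRaiseWitness_is_fstring_start_py.1) (pvRaiseWitness_is_fstring_start_py.2) ∧ Raises_is_fstring_start_py (pvRaiseWitness_is_fstring_start_py.1) (pvRaiseWitness_is_fstring_start_py.2) ∧ is_fstring_start_py_alt (pvRaiseWitness_is_fstring_start_py.1) (pvRaiseWitness_is_fstring_start_py.2) = pvRaiseWitnessOut_is_fstring_start_py)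

-- ===== LEMMAS AND PROOFS =====

theorem char_toNat_inj {c d : Char} (h : c.toNat = d.toNat) : c = d := by
  have := Char.ofNat_toNat c
  rw [h, Char.ofNat_toNat] at this
  exact this.symm

theorem char_le_toNat {c d : Char} : c ≤ d ↔ c.toNat ≤ d.toNat := by
  rw [Char.le_def]; exact UInt32.le_iff_toNat_le

-- lowerChar sends exactly {lo, up} to the lowercase letter lo (lo = up + 32)
theorem lowerChar_eq_lit (c lo up : Char) (h1 : lo.toNat = up.toNat + 32)
    (h2 : 97 ≤ lo.toNat) (h3 : lo.toNat ≤ 122) :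
    (PySem.Chars.lowerChar c = lo) ↔ (c = lo ∨ c = up) := by
  unfold PySem.Chars.lowerChar PySem.Chars.isupper
  have hA : ('A' ≤ c) = (65 ≤ c.toNat) := by rw [char_le_toNat]; rfl
  have hZ : (c ≤ 'Z') = (c.toNat ≤ 90) := by rw [char_le_toNat]; rfl
  split
  · rename_i h
    simp only [Bool.and_eq_true, decide_eq_true_eq, hA, hZ] at h
    have hval : (c.toNat + 32).isValidChar := by constructor; omega
    constructor
    · intro he
      have ht : (Char.ofNat (c.toNat + 32)).toNat = lo.toNat := by rw [he]
      rw [Char.toNat_ofNat, if_pos hval] at ht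
      right; apply char_toNat_inj; omega
    · rintro (rfl | rfl)
      · omega
      · apply char_toNat_inj
        rw [Char.toNat_ofNat, if_pos hval]; omega
  · rename_i h
    simp only [Bool.and_eq_true, decide_eq_true_eq, hA, hZ, not_and_or, not_le] at h
    constructor
    · intro he; left; exact he
    · rintro (rfl | rfl)
      · rfl
      · exfalso; rcases h with h | h <;> omega

theorem alnum_of_alpha {c : Char} (h : PySem.Chars.isalpha c = true) :
    PySem.Chars.isalnum c = true := by
  unfold PySem.Chars.isalnum; rw [h]; rfl

-- backward-scan characterization
theorem scan_le (cs : List Char) (p : Nat) : fstrScanStart cs p ≤ p := by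
  induction p with
  | zero => simp [fstrScanStart]
  | succ s ih =>
    unfold fstrScanStart
    split
    · omega
    · omega

theorem scan_alpha (cs : List Char) (p : Nat) :
    ∀ i, fstrScanStart cs p ≤ i → i < p → PySem.Chars.isalpha (cs.getD i ' ') = true := by
  induction p with
  | zero => intro i h1 h2; omega
  | succ s ih =>
    intro i h1 h2
    unfold fstrScanStart at h1
    split at h1
    · rename_i ha
      rcases Nat.lt_or_ge i s with h | h
      · exact ih i h1 h
      · have : i = s := by omega
        subst this; exact ha
    · omega

theorem scan_boundary (cs : List Char) (p : Nat) :
    fstrScanStart cs p = 0 ∨ PySem.Chars.isalpha (cs.getD (fstrScanStart cs p - 1) ' ') = false := by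
  induction p with
  | zero => left; rfl
  | succ s ih =>
    unfold fstrScanStart
    split
    · exact ih
    · rename_i ha
      right; simpa using eq_false_of_ne_true ha

theorem drop_eq_getD_cons (cs : List Char) (i : Nat) (h : i < cs.length) :
    cs.drop i = cs.getD i ' ' :: cs.drop (i + 1) := by
  rw [List.getD_eq_getElem _ _ h]
  exact (List.getElem_cons_drop h).symm

theorem slice_len_nat (cs : List Char) (s p : Nat) (hp : p ≤ cs.length) :
    (PySem.List.slice cs (some (s : Int)) (some (p : Int))).length = p - s := by
  rw [PySem.List.slice_natCast]
  simp [List.length_take, List.length_drop]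
  omega

theorem slice_one (cs : List Char) (p : Nat) (h1 : 1 ≤ p) (hp : p ≤ cs.length) :
    PySem.List.slice cs (some ((p : Int) - 1)) (some (p : Int)) = [cs.getD (p - 1) ' '] := by
  have hcast : ((p : Int) - 1) = ((p - 1 : Nat) : Int) := by omega
  rw [hcast, PySem.List.slice_natCast, drop_eq_getD_cons cs (p - 1) (by omega)]
  have h : p - (p - 1) = 1 := by omega
  rw [h]
  rfl

theorem slice_two (cs : List Char) (p : Nat) (h2 : 2 ≤ p) (hp : p ≤ cs.length) :
    PySem.List.slice cs (some ((p : Int) - 2)) (some (p : Int)) =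
      [cs.getD (p - 2) ' ', cs.getD (p - 1) ' '] := by
  have hcast : ((p : Int) - 2) = ((p - 2 : Nat) : Int) := by omega
  rw [hcast, PySem.List.slice_natCast, drop_eq_getD_cons cs (p - 2) (by omega)]
  have h21 : p - 2 + 1 = p - 1 := by omega
  rw [h21, drop_eq_getD_cons cs (p - 1) (by omega)]
  have h : p - (p - 2) = 2 := by omega
  rw [h]
  rfl

-- A's loop returns (False, False) for any negative position
theorem loop_neg (cs : List Char) (pos : Int) (h : pos < 0) :
    ∀ l, fstrPrefixLoop cs pos l = (false, false) := by
  intro l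
  induction l with
  | nil => rfl
  | cons e rest ih =>
    obtain ⟨pre, v⟩ := e
    rw [fstrPrefixLoop, if_neg, ih]
    intro hc
    have := hc.1
    simp only [ge_iff_le] at this
    omega

-- one loop step for a 1-char table entry, with the condition over Nat indices
theorem loop_step_one (cs : List Char) (p : Nat) (hp : p ≤ cs.length)
    (x : Char) (v : Bool × Bool) (rest : List (List Char × (Bool × Bool))) :
    fstrPrefixLoop cs (p : Int) (([x], v) :: rest) =
      if 1 ≤ p ∧ cs.getD (p - 1) ' ' = x ∧
          (p = 1 ∨ PySem.Chars.isalnum (cs.getD (p - 2) ' ') = false) then v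
      else fstrPrefixLoop cs (p : Int) rest := by
  rw [fstrPrefixLoop]
  refine if_congr ?_ rfl rfl
  simp only [List.length_cons, List.length_nil, Nat.cast_one, zero_add]
  constructor
  · rintro ⟨hge, hsl, hb⟩
    have h1 : 1 ≤ p := by omega
    refine ⟨h1, ?_, ?_⟩
    · rw [slice_one cs p h1 hp] at hsl
      exact List.head_eq_of_cons_eq hsl
    · by_cases hp1 : p = 1
      · exact Or.inl hp1
      · right
        rcases hb with hb | hb
        · omega
        · have hcast : (p : Int) - 1 - 1 = ((p - 2 : Nat) : Int) := by omega
          rw [hcast, PySem.List.pyGetD_natCast] at hb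
          exact hb
  · rintro ⟨h1, hx, hb⟩
    refine ⟨by omega, by rw [slice_one cs p h1 hp, hx], ?_⟩
    by_cases hp1 : p = 1
    · left; omega
    · right
      rcases hb with hb | hb
      · omega
      · have hcast : (p : Int) - 1 - 1 = ((p - 2 : Nat) : Int) := by omega
        rw [hcast, PySem.List.pyGetD_natCast]
        exact hb

-- one loop step for a 2-char table entry
theorem loop_step_two (cs : List Char) (p : Nat) (hp : p ≤ cs.length)
    (x y : Char) (v : Bool × Bool) (rest : List (List Char × (Bool × Bool))) :
    fstrPrefixLoop cs (p : Int) (([x, y], v) :: rest) =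
      if 2 ≤ p ∧ cs.getD (p - 2) ' ' = x ∧ cs.getD (p - 1) ' ' = y ∧
          (p = 2 ∨ PySem.Chars.isalnum (cs.getD (p - 3) ' ') = false) then v
      else fstrPrefixLoop cs (p : Int) rest := by
  rw [fstrPrefixLoop]
  refine if_congr ?_ rfl rfl
  simp only [List.length_cons, List.length_nil, Nat.reduceAdd, Nat.cast_ofNat, zero_add]
  constructor
  · rintro ⟨hge, hsl, hb⟩
    have h2 : 2 ≤ p := by omega
    have hslice := slice_two cs p h2 hp
    rw [hslice] at hsl
    refine ⟨h2, List.head_eq_of_cons_eq hsl, ?_, ?_⟩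
    · have := List.tail_eq_of_cons_eq hsl
      exact List.head_eq_of_cons_eq this
    · by_cases hp2 : p = 2
      · exact Or.inl hp2
      · right
        rcases hb with hb | hb
        · omega
        · have hcast : (p : Int) - 2 - 1 = ((p - 3 : Nat) : Int) := by omega
          rw [hcast, PySem.List.pyGetD_natCast] at hb
          exact hb
  · rintro ⟨h2, hx, hy, hb⟩
    refine ⟨by omega, by rw [slice_two cs p h2 hp, hx, hy], ?_⟩
    by_cases hp2 : p = 2
    · left; omega
    · right
      rcases hb with hb | hb
      · omega
      · have hcast : (p : Int) - 2 - 1 = ((p - 3 : Nat) : Int) := by omega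
        rw [hcast, PySem.List.pyGetD_natCast]
        exact hb

-- case split on a character being one of f, F, r, R or none of them
theorem char_cases5 (a : Char) :
    a = 'f' ∨ a = 'F' ∨ a = 'r' ∨ a = 'R' ∨ (a ≠ 'f' ∧ a ≠ 'F' ∧ a ≠ 'r' ∧ a ≠ 'R') := by
  by_cases h1 : a = 'f'
  · exact Or.inl h1
  by_cases h2 : a = 'F'
  · exact Or.inr (Or.inl h2)
  by_cases h3 : a = 'r'
  · exact Or.inr (Or.inr (Or.inl h3))
  by_cases h4 : a = 'R'
  · exact Or.inr (Or.inr (Or.inr (Or.inl h4)))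
  exact Or.inr (Or.inr (Or.inr (Or.inr ⟨h1, h2, h3, h4⟩)))

-- A's 1-char table entries agree with B's classification of the case-folded 1-char prefix
theorem classify_one (a : Char) :
    (if a = 'f' then ((true:Bool), (false:Bool))
     else if a = 'F' then (true, false)
     else (false, false)) =
    (if ([PySem.Chars.lowerChar a] : List Char) = ['f'] then (true, false)
     else if ([PySem.Chars.lowerChar a] : List Char) = ['f', 'r'] ∨
         ([PySem.Chars.lowerChar a] : List Char) = ['r', 'f'] then (true, true)
     else (false, false)) := by
  have hfa := lowerChar_eq_lit a 'f' 'F' rfl (by decide) (by decide)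
  rcases char_cases5 a with rfl | rfl | rfl | rfl | ⟨n1, n2, n3, n4⟩ <;> simp_all

-- A's 8 two-char table entries agree with B's classification of the case-folded 2-char prefix
theorem classify_two (a b : Char) :
    (if a = 'r' ∧ b = 'f' then ((true:Bool), (true:Bool))
     else if a = 'R' ∧ b = 'f' then (true, true)
     else if a = 'r' ∧ b = 'F' then (true, true)
     else if a = 'R' ∧ b = 'F' then (true, true)
     else if a = 'f' ∧ b = 'r' then (true, true)
     else if a = 'F' ∧ b = 'r' then (true, true)
     else if a = 'f' ∧ b = 'R' then (true, true)
     else if a = 'F' ∧ b = 'R' then (true, true)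
     else (false, false)) =
    (if ([PySem.Chars.lowerChar a, PySem.Chars.lowerChar b] : List Char) = ['f'] then (true, false)
     else if ([PySem.Chars.lowerChar a, PySem.Chars.lowerChar b] : List Char) = ['f', 'r'] ∨
         ([PySem.Chars.lowerChar a, PySem.Chars.lowerChar b] : List Char) = ['r', 'f'] then (true, true)
     else (false, false)) := by
  have hfa := lowerChar_eq_lit a 'f' 'F' rfl (by decide) (by decide)
  have hra := lowerChar_eq_lit a 'r' 'R' rfl (by decide) (by decide)
  have hfb := lowerChar_eq_lit b 'f' 'F' rfl (by decide) (by decide)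
  have hrb := lowerChar_eq_lit b 'r' 'R' rfl (by decide) (by decide)
  rcases char_cases5 a with rfl | rfl | rfl | rfl | ⟨na1, na2, na3, na4⟩ <;>
    rcases char_cases5 b with rfl | rfl | rfl | rfl | ⟨nb1, nb2, nb3, nb4⟩ <;>
    simp_all


-- the heart of the equivalence: A's table loop equals B's scan-and-classify tail
theorem loop_eq_scan (cs : List Char) (p : Nat) (hp : p ≤ cs.length) :
    fstrPrefixLoop cs (p : Int) fstrPrefixes =
      (if 0 < fstrScanStart cs p ∧
          PySem.Chars.isalnum (cs.getD (fstrScanStart cs p - 1) ' ') = true then (false, false)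
       else
         if PySem.Chars.lower (PySem.List.slice cs (some ((fstrScanStart cs p : Nat) : Int)) (some (p : Int))) = ['f'] then (true, false)
         else if PySem.Chars.lower (PySem.List.slice cs (some ((fstrScanStart cs p : Nat) : Int)) (some (p : Int))) = ['f', 'r'] ∨
             PySem.Chars.lower (PySem.List.slice cs (some ((fstrScanStart cs p : Nat) : Int)) (some (p : Int))) = ['r', 'f'] then (true, true)
         else (false, false)) := by
  simp only [fstrPrefixes]
  rw [loop_step_one cs p hp 'f', loop_step_one cs p hp 'F',
      loop_step_two cs p hp 'r' 'f', loop_step_two cs p hp 'R' 'f',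
      loop_step_two cs p hp 'r' 'F', loop_step_two cs p hp 'R' 'F',
      loop_step_two cs p hp 'f' 'r', loop_step_two cs p hp 'F' 'r',
      loop_step_two cs p hp 'f' 'R', loop_step_two cs p hp 'F' 'R',
      show fstrPrefixLoop cs (p : Int) [] = (false, false) from rfl]
  have hsle := scan_le cs p
  have halpha := scan_alpha cs p
  have hbd := scan_boundary cs p
  set s := fstrScanStart cs p with hs
  have hlen : (PySem.Chars.lower (PySem.List.slice cs (some ((s : Nat) : Int)) (some (p : Int)))).length = p - s := by
    unfold PySem.Chars.lower
    rw [List.length_map, slice_len_nat cs s p hp]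
  rcases Nat.lt_or_ge (p - s) 3 with hklt | hk3
  case inr =>
    -- run of ≥ 3 alphabetic characters before pos: every table entry fails, B's prefix is too long
    have ha2 : PySem.Chars.isalnum (cs.getD (p - 2) ' ') = true :=
      alnum_of_alpha (halpha (p - 2) (by omega) (by omega))
    have ha3 : PySem.Chars.isalnum (cs.getD (p - 3) ' ') = true :=
      alnum_of_alpha (halpha (p - 3) (by omega) (by omega))
    have n1 : ∀ x : Char, ¬ (1 ≤ p ∧ cs.getD (p - 1) ' ' = x ∧
        (p = 1 ∨ PySem.Chars.isalnum (cs.getD (p - 2) ' ') = false)) := by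
      rintro x ⟨-, -, h | h⟩
      · omega
      · rw [ha2] at h; cases h
    have n2 : ∀ x y : Char, ¬ (2 ≤ p ∧ cs.getD (p - 2) ' ' = x ∧ cs.getD (p - 1) ' ' = y ∧
        (p = 2 ∨ PySem.Chars.isalnum (cs.getD (p - 3) ' ') = false)) := by
      rintro x y ⟨-, -, -, h | h⟩
      · omega
      · rw [ha3] at h; cases h
    rw [if_neg (n1 'f'), if_neg (n1 'F'), if_neg (n2 'r' 'f'), if_neg (n2 'R' 'f'),
        if_neg (n2 'r' 'F'), if_neg (n2 'R' 'F'), if_neg (n2 'f' 'r'), if_neg (n2 'F' 'r'),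
        if_neg (n2 'f' 'R'), if_neg (n2 'F' 'R')]
    split_ifs with h1 h2 h3
    · rfl
    · exfalso; rw [h2] at hlen; simp at hlen; omega
    · exfalso; rcases h3 with h3 | h3 <;> (rw [h3] at hlen; simp at hlen; omega)
    · rfl
  case inl =>
    interval_cases hk : (p - s)
    · -- empty prefix: nothing alphabetic immediately before pos
      have hsl0 : PySem.List.slice cs (some ((s : Nat) : Int)) (some ((p : Nat) : Int)) = ([] : List Char) := by
        apply List.eq_nil_of_length_eq_zero
        rw [slice_len_nat cs s p hp]
        omega
      have n1 : ∀ x : Char, PySem.Chars.isalpha x = true →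
          ¬ (1 ≤ p ∧ cs.getD (p - 1) ' ' = x ∧
            (p = 1 ∨ PySem.Chars.isalnum (cs.getD (p - 2) ' ') = false)) := by
        rintro x hx ⟨h1, hgx, -⟩
        rcases hbd with h | h
        · omega
        · rw [show s = p by omega, hgx, hx] at h; cases h
      have n2 : ∀ x y : Char, PySem.Chars.isalpha y = true →
          ¬ (2 ≤ p ∧ cs.getD (p - 2) ' ' = x ∧ cs.getD (p - 1) ' ' = y ∧
            (p = 2 ∨ PySem.Chars.isalnum (cs.getD (p - 3) ' ') = false)) := by
        rintro x y hy ⟨h2, -, hgy, -⟩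
        rcases hbd with h | h
        · omega
        · rw [show s = p by omega, hgy, hy] at h; cases h
      rw [if_neg (n1 'f' rfl), if_neg (n1 'F' rfl), if_neg (n2 'r' 'f' rfl), if_neg (n2 'R' 'f' rfl),
          if_neg (n2 'r' 'F' rfl), if_neg (n2 'R' 'F' rfl), if_neg (n2 'f' 'r' rfl), if_neg (n2 'F' 'r' rfl),
          if_neg (n2 'f' 'R' rfl), if_neg (n2 'F' 'R' rfl), hsl0]
      split_ifs with h1 h2 h3
      · rfl
      · simp [PySem.Chars.lower] at h2
      · exfalso; rcases h3 with h3 | h3 <;> simp [PySem.Chars.lower] at h3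
      · rfl
    · -- one-character prefix
      have hp1 : 1 ≤ p := by omega
      have hcast : ((s : Nat) : Int) = (p : Int) - 1 := by omega
      rw [hcast, slice_one cs p hp1 hp]
      by_cases hbf : 0 < s ∧ PySem.Chars.isalnum (cs.getD (s - 1) ' ') = true
      · obtain ⟨hs0, hsal⟩ := hbf
        have hbdf : PySem.Chars.isalpha (cs.getD (s - 1) ' ') = false := by
          rcases hbd with h | h
          · omega
          · exact h
        have n1 : ∀ x : Char, ¬ (1 ≤ p ∧ cs.getD (p - 1) ' ' = x ∧
            (p = 1 ∨ PySem.Chars.isalnum (cs.getD (p - 2) ' ') = false)) := by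
          rintro x ⟨-, -, h | h⟩
          · omega
          · rw [show p - 2 = s - 1 by omega, hsal] at h; cases h
        have n2 : ∀ x y : Char, PySem.Chars.isalpha x = true →
            ¬ (2 ≤ p ∧ cs.getD (p - 2) ' ' = x ∧ cs.getD (p - 1) ' ' = y ∧
              (p = 2 ∨ PySem.Chars.isalnum (cs.getD (p - 3) ' ') = false)) := by
          rintro x y hx ⟨h2, hgx, -, -⟩
          rw [show s - 1 = p - 2 by omega, hgx, hx] at hbdf; cases hbdf
        rw [if_neg (n1 'f'), if_neg (n1 'F'), if_neg (n2 'r' 'f' rfl), if_neg (n2 'R' 'f' rfl),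
            if_neg (n2 'r' 'F' rfl), if_neg (n2 'R' 'F' rfl), if_neg (n2 'f' 'r' rfl), if_neg (n2 'F' 'r' rfl),
            if_neg (n2 'f' 'R' rfl), if_neg (n2 'F' 'R' rfl), if_pos ⟨hs0, hsal⟩]
      · rw [if_neg hbf]
        have hnb : p = 1 ∨ PySem.Chars.isalnum (cs.getD (p - 2) ' ') = false := by
          rcases Decidable.not_and_iff_or_not.mp hbf with h | h
          · left; omega
          · right
            rw [show p - 2 = s - 1 by omega]
            simpa using h
        have n2 : ∀ x y : Char, PySem.Chars.isalpha x = true →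
            ¬ (2 ≤ p ∧ cs.getD (p - 2) ' ' = x ∧ cs.getD (p - 1) ' ' = y ∧
              (p = 2 ∨ PySem.Chars.isalnum (cs.getD (p - 3) ' ') = false)) := by
          rintro x y hx ⟨h2, hgx, -, -⟩
          rcases hbd with h | h
          · omega
          · rw [show s - 1 = p - 2 by omega, hgx, hx] at h; cases h
        rw [if_neg (n2 'r' 'f' rfl), if_neg (n2 'R' 'f' rfl), if_neg (n2 'r' 'F' rfl),
            if_neg (n2 'R' 'F' rfl), if_neg (n2 'f' 'r' rfl), if_neg (n2 'F' 'r' rfl),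
            if_neg (n2 'f' 'R' rfl), if_neg (n2 'F' 'R' rfl)]
        have hCf : (1 ≤ p ∧ cs.getD (p - 1) ' ' = 'f' ∧
            (p = 1 ∨ PySem.Chars.isalnum (cs.getD (p - 2) ' ') = false)) ↔ cs.getD (p - 1) ' ' = 'f' :=
          ⟨fun h => h.2.1, fun h => ⟨hp1, h, hnb⟩⟩
        have hCF : (1 ≤ p ∧ cs.getD (p - 1) ' ' = 'F' ∧
            (p = 1 ∨ PySem.Chars.isalnum (cs.getD (p - 2) ' ') = false)) ↔ cs.getD (p - 1) ' ' = 'F' :=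
          ⟨fun h => h.2.1, fun h => ⟨hp1, h, hnb⟩⟩
        simp only [hCf, hCF, PySem.Chars.lower, List.map_cons, List.map_nil]
        exact classify_one (cs.getD (p - 1) ' ')
    · -- two-character prefix
      have hp2 : 2 ≤ p := by omega
      have hcast : ((s : Nat) : Int) = (p : Int) - 2 := by omega
      have hba2 : PySem.Chars.isalnum (cs.getD (p - 2) ' ') = true :=
        alnum_of_alpha (halpha (p - 2) (by omega) (by omega))
      have n1 : ∀ x : Char, ¬ (1 ≤ p ∧ cs.getD (p - 1) ' ' = x ∧
          (p = 1 ∨ PySem.Chars.isalnum (cs.getD (p - 2) ' ') = false)) := by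
        rintro x ⟨-, -, h | h⟩
        · omega
        · rw [hba2] at h; cases h
      rw [hcast, slice_two cs p hp2 hp, if_neg (n1 'f'), if_neg (n1 'F')]
      by_cases hbf : 0 < s ∧ PySem.Chars.isalnum (cs.getD (s - 1) ' ') = true
      · obtain ⟨hs0, hsal⟩ := hbf
        have n2 : ∀ x y : Char, ¬ (2 ≤ p ∧ cs.getD (p - 2) ' ' = x ∧ cs.getD (p - 1) ' ' = y ∧
            (p = 2 ∨ PySem.Chars.isalnum (cs.getD (p - 3) ' ') = false)) := by
          rintro x y ⟨-, -, -, h | h⟩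
          · omega
          · rw [show p - 3 = s - 1 by omega, hsal] at h; cases h
        rw [if_neg (n2 'r' 'f'), if_neg (n2 'R' 'f'), if_neg (n2 'r' 'F'), if_neg (n2 'R' 'F'),
            if_neg (n2 'f' 'r'), if_neg (n2 'F' 'r'), if_neg (n2 'f' 'R'), if_neg (n2 'F' 'R'),
            if_pos ⟨hs0, hsal⟩]
      · rw [if_neg hbf]
        have hnb : p = 2 ∨ PySem.Chars.isalnum (cs.getD (p - 3) ' ') = false := by
          rcases Decidable.not_and_iff_or_not.mp hbf with h | h
          · left; omega
          · right
            rw [show p - 3 = s - 1 by omega]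
            simpa using h
        have hC : ∀ x y : Char, (2 ≤ p ∧ cs.getD (p - 2) ' ' = x ∧ cs.getD (p - 1) ' ' = y ∧
            (p = 2 ∨ PySem.Chars.isalnum (cs.getD (p - 3) ' ') = false)) ↔
            (cs.getD (p - 2) ' ' = x ∧ cs.getD (p - 1) ' ' = y) :=
          fun x y => ⟨fun h => ⟨h.2.1, h.2.2.1⟩, fun ⟨hx, hy⟩ => ⟨hp2, hx, hy, hnb⟩⟩
        simp only [hC, PySem.Chars.lower, List.map_cons, List.map_nil]
        exact classify_two (cs.getD (p - 2) ' ') (cs.getD (p - 1) ' ')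

theorem is_fstring_start_py_spec : Claim_equal_is_fstring_start_py := by
  intro line pos hdom hpre
  unfold Pre_is_fstring_start_py at hpre
  unfold Spec_is_fstring_start_py
  simp only [is_fstring_start_py, is_fstring_start_py_alt]
  by_cases hge : (line.toList.length : Int) ≤ pos
  · rw [if_pos (by omega : pos ≥ (line.toList.length : Int)), if_pos (Or.inr (by omega))]
  · by_cases hneg : pos < 0
    · rw [if_neg (by omega : ¬ pos ≥ (line.toList.length : Int)), if_pos (Or.inl hneg)]
      split
      · rfl
      · rename_i c heq
        by_cases h : c = '"' ∨ c = '\''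
        · rw [if_neg (not_not_intro h)]
          exact loop_neg line.toList pos hneg fstrPrefixes
        · rw [if_pos h]
    · have h0 : 0 ≤ pos := by omega
      obtain ⟨p, rfl⟩ : ∃ p : Nat, pos = (p : Int) := ⟨pos.toNat, (Int.toNat_of_nonneg h0).symm⟩
      have hplt : p < line.toList.length := by omega
      rw [if_neg (by omega : ¬ (p : Int) ≥ (line.toList.length : Int)),
          if_neg (by omega : ¬ ((p : Int) < 0 ∨ (p : Int) ≥ (line.toList.length : Int)))]
      simp only [Int.toNat_natCast]
      rw [List.getD_eq_getElem line.toList ' ' hplt]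
      split
      · rename_i heq
        rw [PySem.List.pyGet?_natCast, List.getElem?_eq_getElem hplt] at heq
        cases heq
      · rename_i c heq
        rw [PySem.List.pyGet?_natCast, List.getElem?_eq_getElem hplt] at heq
        obtain rfl : c = line.toList[p] := by injection heq with h; exact h.symm
        by_cases h : line.toList[p] = '"' ∨ line.toList[p] = '\''
        · rw [if_neg (not_not_intro h), if_neg (not_not_intro h),
              loop_eq_scan line.toList p (le_of_lt hplt)]
          rfl
        · rw [if_pos h, if_pos h]

def is_fstring_start_py_raises : Claim_raises_is_fstring_start_py := by
  unfold Claim_raises_is_fstring_start_py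
  constructor
  · intro line pos _ hr
    unfold Raises_is_fstring_start_py at hr
    unfold Pre_is_fstring_start_py
    omega
  · exact ⟨by decide, by decide, by decide⟩
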